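-- pv_equiv track=rewrite | github.com/jjsakon/johnModules | SWRmodule.py | getElectrodeRanges
-- ===== SOURCE A (Python) =====
-- def getElectrodeRanges(elec_regions,exp,sub,session,mont):
--     # remove bad range of electrodes (high noise or repetitive channels) that I found by manually looking through raster plots.
--     # note that each of these subs/sessions should be documented in a pairs of ppts in the FR1/catFR1 cleaning folders on box
--     # Oftentimes if there are 3 pairs in a row that were all in HPC, I'll remove the middle one since it has some redundant signals
--     # with each of other two
--     # 2021-10-28 adding in repFR
--     electrode_search_range = range(len(elec_regions))
--     if exp == 'FR1':
--         if sub == 'R1120E':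
--             electrode_search_range = range(30) # HPC elecs after 25:26 have lots of artifacts that get picked up as SWRs. See subject figure PPT
--         elif sub == 'R1349T': # channels 90 and below have tons of artifcats. After that looks okay though
--             electrode_search_range = range(91,len(elec_regions))
--         elif sub == 'R1397D': # for these two sessions two pairs of the electrodes have lots of correlated noise. Remove them
--             electrode_search_range = [i for i in range(len(elec_regions)) if i != 60]
--             electrode_search_range.remove(110)
--         elif sub == 'R1332M' and session == 1:
--             electrode_search_range = [i for i in range(len(elec_regions)) if i != 48] # some real weird bands in these couple sessions
--             electrode_search_range.remove(49)
--         elif sub == 'R1299T':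
--             electrode_search_range = [i for i in range(len(elec_regions)) if i != 34] # see PPT. These two pairs shared an electrode and had tons of correlated artifacts
--             electrode_search_range.remove(43)
--     # note that I'm okay with overlap in say entorhinal also removing hippocampal channels. So don't specify region in these
--     # just assume that the overlap exists in all cases
--     elif exp == 'catFR1':
--         if sub == 'R1269E':
--             electrode_search_range = [i for i in range(len(elec_regions)) if i != 11] # 10, 11, 54, 55 all look identical in HPC raster so remove latter 3
--             electrode_search_range.remove(54) # (see SWR catFR1 problem sessions ppt for details)
--             electrode_search_range.remove(55)
--         elif sub == 'R1328E':
--             electrode_search_range = [i for i in range(len(elec_regions)) if i != 38] # overlapping signal with ch 37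
--         elif sub == 'R1367D':
--             electrode_search_range = [i for i in range(len(elec_regions)) if i != 71] # overlapping signals with neighbor
--             electrode_search_range.remove(96)
--         elif sub == 'R1397D':
--             electrode_search_range = [i for i in range(len(elec_regions)) if i != 110]
--             electrode_search_range.remove(60)
--         elif sub == 'R1405E' and mont==0:
--             electrode_search_range = [i for i in range(len(elec_regions)) if i != 44]
--         elif sub == 'R1405E' and mont==1:
--             electrode_search_range = [i for i in range(len(elec_regions)) if i != 79]
--         elif sub == 'R1447M': # overlapping with neighbors. again documented in SWR catFR1 problem sessions ppt
--             electrode_search_range = [i for i in range(len(elec_regions)) if i != 15]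
--             electrode_search_range.remove(17)
--         elif sub == 'R1469D':
--             electrode_search_range = [i for i in range(len(elec_regions)) if i != 16]
--         elif sub == 'R1489E':
--             electrode_search_range = [i for i in range(len(elec_regions)) if i != 3] # first entorhinal...see catFR1 prob session ppt
--             electrode_search_range.remove(55)
--         elif sub == 'R1400N':
--             electrode_search_range = [i for i in range(len(elec_regions)) if i != 39] # entorhinal...middle of 3 consecutive channels
--         elif sub == 'R1190P':
--             electrode_search_range = [i for i in range(len(elec_regions)) if i != 96] # entorhinal...3rd of 4 consecutive channels
--         elif sub == 'R1092J':
--             electrode_search_range = [i for i in range(len(elec_regions)) if i != 39] # entorhinal...3rd of 4 consecutive channels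
--         elif sub == 'R1028M':
--             electrode_search_range = [i for i in range(len(elec_regions)) if i != 8] # entorhinal...3rd of 4 consecutive channels
--         elif sub == 'R1107J':
--             electrode_search_range = [i for i in range(len(elec_regions)) if i != 3] # parahippocampal...4th of 5 consecutive channels
--         elif sub == 'R1364C':
--             electrode_search_range = [i for i in range(len(elec_regions)) if i != 60] # parahippocampal...3rd of 4 consecutive channels
--         elif sub == 'R1527J':
--             electrode_search_range = [i for i in range(len(elec_regions)) if i != 156] # consecutive channels with repeated signal
--     elif exp == 'RepFR1':
--         if sub == 'R1528E':
--             electrode_search_range = [i for i in range(len(elec_regions)) if i != 154]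
--             electrode_search_range.remove(15)
--     return electrode_search_range
-- ===== SOURCE B (Python) =====
-- # Table-driven rewrite: one (exp, sub) -> excluded-channel-set lookup replaces the if/elif cascade.
-- _EXCLUSIONS = {
--     ('FR1', 'R1397D'): {60, 110},
--     ('FR1', 'R1299T'): {34, 43},
--     ('catFR1', 'R1269E'): {11, 54, 55},
--     ('catFR1', 'R1328E'): {38},
--     ('catFR1', 'R1367D'): {71, 96},
--     ('catFR1', 'R1397D'): {110, 60},
--     ('catFR1', 'R1447M'): {15, 17},
--     ('catFR1', 'R1469D'): {16},
--     ('catFR1', 'R1489E'): {3, 55},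
--     ('catFR1', 'R1400N'): {39},
--     ('catFR1', 'R1190P'): {96},
--     ('catFR1', 'R1092J'): {39},
--     ('catFR1', 'R1028M'): {8},
--     ('catFR1', 'R1107J'): {3},
--     ('catFR1', 'R1364C'): {60},
--     ('catFR1', 'R1527J'): {156},
--     ('RepFR1', 'R1528E'): {154, 15},
-- }
--
-- def getElectrodeRanges(elec_regions, exp, sub, session, mont):
--     n = len(elec_regions)
--     if exp == 'FR1' and sub == 'R1120E':
--         return range(30)
--     if exp == 'FR1' and sub == 'R1349T':
--         return range(91, n)
--     if exp == 'FR1' and sub == 'R1332M':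
--         excluded = {48, 49} if session == 1 else set()
--     elif exp == 'catFR1' and sub == 'R1405E':
--         excluded = {44} if mont == 0 else ({79} if mont == 1 else set())
--     else:
--         excluded = _EXCLUSIONS.get((exp, sub), set())
--     if not excluded:
--         return range(n)
--     return [i for i in range(n) if i not in excluded]
-- ===== Notes on version B (the rewrite author's own statement) =====
-- stated objective: simpler
-- what changed: Replaces the 20-branch if/elif cascade (list comprehension + .remove per subject) with a single (exp, sub) -> excluded-channel-set lookup table plus one filtered range build; only the two range-returning subjects and the session/mont-conditioned subjects stay as explicit branches.
import Mathlib
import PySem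

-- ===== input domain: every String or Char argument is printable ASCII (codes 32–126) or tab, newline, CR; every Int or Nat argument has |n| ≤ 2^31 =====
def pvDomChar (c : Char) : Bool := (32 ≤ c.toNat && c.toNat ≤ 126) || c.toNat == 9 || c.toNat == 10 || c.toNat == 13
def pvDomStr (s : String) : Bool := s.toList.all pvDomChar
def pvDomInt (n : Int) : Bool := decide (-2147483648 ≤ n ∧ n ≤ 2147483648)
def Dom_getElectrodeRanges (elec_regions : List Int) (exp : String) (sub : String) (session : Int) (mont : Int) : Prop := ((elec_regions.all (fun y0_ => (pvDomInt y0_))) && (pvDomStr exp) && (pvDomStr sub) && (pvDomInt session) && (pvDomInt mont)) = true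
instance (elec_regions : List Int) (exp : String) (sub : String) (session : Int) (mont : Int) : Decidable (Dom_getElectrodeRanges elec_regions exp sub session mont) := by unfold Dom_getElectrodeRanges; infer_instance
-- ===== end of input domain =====

-- B replaces A's 20-branch if/elif cascade with one (exp, sub) -> excluded-channel-set
-- lookup table and a single filtered range build (objective: simpler).


-- ===== PORT A =====
-- helper for 'lst.remove(v)': Python raises ValueError when v ∉ lst; those inputs are
-- excluded by Pre_, so the .getD [] default is never relied upon by the claim.
def pyRemoveBang (lst : List Int) (v : Int) : List Int :=
  (PySem.List.remove? lst v).getD []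

def getElectrodeRanges (elec_regions : List Int) (exp : String) (sub : String) (session : Int) (mont : Int) : List Int :=
  let n : Int := (elec_regions.length : Int)
  let electrode_search_range := PySem.List.pyRange 0 n 1
  if exp = "FR1" then
    if sub = "R1120E" then PySem.List.pyRange 0 30 1
    else if sub = "R1349T" then PySem.List.pyRange 91 n 1
    else if sub = "R1397D" then
      pyRemoveBang ((PySem.List.pyRange 0 n 1).filter (fun i => i != 60)) 110
    else if sub = "R1332M" ∧ session = 1 then
      pyRemoveBang ((PySem.List.pyRange 0 n 1).filter (fun i => i != 48)) 49
    else if sub = "R1299T" then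
      pyRemoveBang ((PySem.List.pyRange 0 n 1).filter (fun i => i != 34)) 43
    else electrode_search_range
  else if exp = "catFR1" then
    if sub = "R1269E" then
      pyRemoveBang (pyRemoveBang ((PySem.List.pyRange 0 n 1).filter (fun i => i != 11)) 54) 55
    else if sub = "R1328E" then
      (PySem.List.pyRange 0 n 1).filter (fun i => i != 38)
    else if sub = "R1367D" then
      pyRemoveBang ((PySem.List.pyRange 0 n 1).filter (fun i => i != 71)) 96
    else if sub = "R1397D" then
      pyRemoveBang ((PySem.List.pyRange 0 n 1).filter (fun i => i != 110)) 60
    else if sub = "R1405E" ∧ mont = 0 then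
      (PySem.List.pyRange 0 n 1).filter (fun i => i != 44)
    else if sub = "R1405E" ∧ mont = 1 then
      (PySem.List.pyRange 0 n 1).filter (fun i => i != 79)
    else if sub = "R1447M" then
      pyRemoveBang ((PySem.List.pyRange 0 n 1).filter (fun i => i != 15)) 17
    else if sub = "R1469D" then
      (PySem.List.pyRange 0 n 1).filter (fun i => i != 16)
    else if sub = "R1489E" then
      pyRemoveBang ((PySem.List.pyRange 0 n 1).filter (fun i => i != 3)) 55
    else if sub = "R1400N" then
      (PySem.List.pyRange 0 n 1).filter (fun i => i != 39)
    else if sub = "R1190P" then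
      (PySem.List.pyRange 0 n 1).filter (fun i => i != 96)
    else if sub = "R1092J" then
      (PySem.List.pyRange 0 n 1).filter (fun i => i != 39)
    else if sub = "R1028M" then
      (PySem.List.pyRange 0 n 1).filter (fun i => i != 8)
    else if sub = "R1107J" then
      (PySem.List.pyRange 0 n 1).filter (fun i => i != 3)
    else if sub = "R1364C" then
      (PySem.List.pyRange 0 n 1).filter (fun i => i != 60)
    else if sub = "R1527J" then
      (PySem.List.pyRange 0 n 1).filter (fun i => i != 156)
    else electrode_search_range
  else if exp = "RepFR1" then
    if sub = "R1528E" then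
      pyRemoveBang ((PySem.List.pyRange 0 n 1).filter (fun i => i != 154)) 15
    else electrode_search_range
  else electrode_search_range

-- ===== PORT B =====
-- Source B's module-level dict _EXCLUSIONS: (exp, sub) -> set of excluded channel indices
def pvExclusions : PySem.Dict (String × String) (PySem.Set Int) :=
  PySem.Dict.ofList [(("FR1", "R1397D"), PySem.Set.ofList ([60, 110] : List Int)),
   (("FR1", "R1299T"), PySem.Set.ofList ([34, 43] : List Int)),
   (("catFR1", "R1269E"), PySem.Set.ofList ([11, 54, 55] : List Int)),
   (("catFR1", "R1328E"), PySem.Set.ofList ([38] : List Int)),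
   (("catFR1", "R1367D"), PySem.Set.ofList ([71, 96] : List Int)),
   (("catFR1", "R1397D"), PySem.Set.ofList ([110, 60] : List Int)),
   (("catFR1", "R1447M"), PySem.Set.ofList ([15, 17] : List Int)),
   (("catFR1", "R1469D"), PySem.Set.ofList ([16] : List Int)),
   (("catFR1", "R1489E"), PySem.Set.ofList ([3, 55] : List Int)),
   (("catFR1", "R1400N"), PySem.Set.ofList ([39] : List Int)),
   (("catFR1", "R1190P"), PySem.Set.ofList ([96] : List Int)),
   (("catFR1", "R1092J"), PySem.Set.ofList ([39] : List Int)),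
   (("catFR1", "R1028M"), PySem.Set.ofList ([8] : List Int)),
   (("catFR1", "R1107J"), PySem.Set.ofList ([3] : List Int)),
   (("catFR1", "R1364C"), PySem.Set.ofList ([60] : List Int)),
   (("catFR1", "R1527J"), PySem.Set.ofList ([156] : List Int)),
   (("RepFR1", "R1528E"), PySem.Set.ofList ([154, 15] : List Int))]

def getElectrodeRanges_alt (elec_regions : List Int) (exp : String) (sub : String) (session : Int) (mont : Int) : List Int :=
  let n : Int := (elec_regions.length : Int)
  if exp = "FR1" ∧ sub = "R1120E" then PySem.List.pyRange 0 30 1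
  else if exp = "FR1" ∧ sub = "R1349T" then PySem.List.pyRange 91 n 1
  else
    let excluded : PySem.Set Int :=
      if exp = "FR1" ∧ sub = "R1332M" then
        (if session = 1 then PySem.Set.ofList [48, 49] else PySem.Set.empty)
      else if exp = "catFR1" ∧ sub = "R1405E" then
        (if mont = 0 then PySem.Set.ofList [44]
         else if mont = 1 then PySem.Set.ofList [79] else PySem.Set.empty)
      else PySem.Dict.getD pvExclusions (exp, sub) PySem.Set.empty
    if excluded.isEmpty then PySem.List.pyRange 0 n 1
    else (PySem.List.pyRange 0 n 1).filter (fun i => !(PySem.Set.contains excluded i))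

-- ===== PRECONDITION & SPEC =====
-- Pre_ excludes exactly the inputs on which A raises ValueError: the remove-based
-- subjects with fewer electrodes than the removed channel index requires.
def Pre_getElectrodeRanges (elec_regions : List Int) (exp : String) (sub : String) (session : Int) (mont : Int) : Prop :=
  ¬ (exp = "FR1" ∧ sub = "R1397D" ∧ elec_regions.length < 111) ∧
  ¬ (exp = "FR1" ∧ sub = "R1332M" ∧ session = 1 ∧ elec_regions.length < 50) ∧
  ¬ (exp = "FR1" ∧ sub = "R1299T" ∧ elec_regions.length < 44) ∧
  ¬ (exp = "catFR1" ∧ sub = "R1269E" ∧ elec_regions.length < 56) ∧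
  ¬ (exp = "catFR1" ∧ sub = "R1367D" ∧ elec_regions.length < 97) ∧
  ¬ (exp = "catFR1" ∧ sub = "R1397D" ∧ elec_regions.length < 61) ∧
  ¬ (exp = "catFR1" ∧ sub = "R1447M" ∧ elec_regions.length < 18) ∧
  ¬ (exp = "catFR1" ∧ sub = "R1489E" ∧ elec_regions.length < 56) ∧
  ¬ (exp = "RepFR1" ∧ sub = "R1528E" ∧ elec_regions.length < 16)
instance (elec_regions : List Int) (exp : String) (sub : String) (session : Int) (mont : Int) : Decidable (Pre_getElectrodeRanges elec_regions exp sub session mont) := by unfold Pre_getElectrodeRanges; infer_instance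

def pvWitness_getElectrodeRanges : List Int × String × String × Int × Int := ([5, 7, 9], "FR1", "R1300X", 0, 0)

def Spec_getElectrodeRanges (elec_regions : List Int) (exp : String) (sub : String) (session : Int) (mont : Int) (out : List Int) : Prop := out = getElectrodeRanges_alt elec_regions exp sub session mont
instance (elec_regions : List Int) (exp : String) (sub : String) (session : Int) (mont : Int) (out : List Int) : Decidable (Spec_getElectrodeRanges elec_regions exp sub session mont out) := by unfold Spec_getElectrodeRanges; infer_instance

-- ===== CLAIM (what is proved, stated in full; the proofs are below) =====
def Claim_equal_getElectrodeRanges : Prop := ∀ (elec_regions : List Int) (exp : String) (sub : String) (session : Int) (mont : Int), Dom_getElectrodeRanges elec_regions exp sub session mont → Pre_getElectrodeRanges elec_regions exp sub session mont → Spec_getElectrodeRanges elec_regions exp sub session mont (getElectrodeRanges elec_regions exp sub session mont)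


-- ===== LEMMAS AND PROOFS =====

-- Python's lst.remove(v) on a duplicate-free list is a filter
lemma removeBang_eq_filter {l : List Int} (hnd : l.Nodup) {v : Int} (hv : v ∈ l) :
    pyRemoveBang l v = l.filter (fun i => i != v) := by
  rw [pyRemoveBang, PySem.List.remove?_eq_some_erase _ _ hv, Option.getD_some,
      hnd.erase_eq_filter]

-- A's one-exclusion comprehension equals B's singleton-set filter
lemma filterOne (n x : Int) :
    (PySem.List.pyRange 0 n 1).filter (fun i => i != x)
      = (PySem.List.pyRange 0 n 1).filter (fun i => !(PySem.Set.contains (PySem.Set.ofList [x]) i)) := by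
  refine List.filter_congr (fun i _ => ?_)
  by_cases h : i = x <;> simp [h, PySem.Set.contains, PySem.Set.ofList]

-- A's comprehension + one .remove equals B's two-element-set filter
lemma removeOne (n x v : Int) (hxv : x ≠ v) (hv : 0 ≤ v) (hvn : v < n) :
    pyRemoveBang ((PySem.List.pyRange 0 n 1).filter (fun i => i != x)) v
      = (PySem.List.pyRange 0 n 1).filter (fun i => !(PySem.Set.contains (PySem.Set.ofList [x, v]) i)) := by
  have hmem : v ∈ (PySem.List.pyRange 0 n 1).filter (fun i => i != x) := by
    simp [List.mem_filter, PySem.List.mem_pyRange_one, hv, hvn, Ne.symm hxv]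
  rw [removeBang_eq_filter ((PySem.List.nodup_pyRange_one 0 n).filter _) hmem, List.filter_filter]
  refine List.filter_congr (fun i _ => ?_)
  by_cases h1 : i = x <;> by_cases h2 : i = v <;>
    simp [h1, h2, PySem.Set.contains, PySem.Set.ofList, Ne.symm hxv, hxv]

-- A's comprehension + two .removes equals B's three-element-set filter
lemma removeTwo (n x v w : Int) (hxv : x ≠ v) (hxw : x ≠ w) (hvw : v ≠ w)
    (hv : 0 ≤ v) (hvn : v < n) (hw : 0 ≤ w) (hwn : w < n) :
    pyRemoveBang (pyRemoveBang ((PySem.List.pyRange 0 n 1).filter (fun i => i != x)) v) w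
      = (PySem.List.pyRange 0 n 1).filter (fun i => !(PySem.Set.contains (PySem.Set.ofList [x, v, w]) i)) := by
  have hmem : v ∈ (PySem.List.pyRange 0 n 1).filter (fun i => i != x) := by
    simp [List.mem_filter, PySem.List.mem_pyRange_one, hv, hvn, Ne.symm hxv]
  rw [removeBang_eq_filter ((PySem.List.nodup_pyRange_one 0 n).filter _) hmem, List.filter_filter]
  have hmem2 : w ∈ (PySem.List.pyRange 0 n 1).filter (fun a => a != v && a != x) := by
    simp [List.mem_filter, PySem.List.mem_pyRange_one, hw, hwn, Ne.symm hxw, Ne.symm hvw]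
  rw [removeBang_eq_filter ((PySem.List.nodup_pyRange_one 0 n).filter _) hmem2, List.filter_filter]
  refine List.filter_congr (fun i _ => ?_)
  by_cases h1 : i = x <;> by_cases h2 : i = v <;> by_cases h3 : i = w <;>
    simp [h1, h2, h3, PySem.Set.contains, PySem.Set.ofList, Ne.symm hxv, hxv, hxw, hvw]

-- pvExclusions as a literal Dict.mk, for the lookup lemmas below
lemma pvExclusions_mk : pvExclusions = PySem.Dict.mk
    [(("FR1", "R1397D"), [60, 110]), (("FR1", "R1299T"), [34, 43]),
     (("catFR1", "R1269E"), [11, 54, 55]), (("catFR1", "R1328E"), [38]),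
     (("catFR1", "R1367D"), [71, 96]), (("catFR1", "R1397D"), [110, 60]),
     (("catFR1", "R1447M"), [15, 17]), (("catFR1", "R1469D"), [16]),
     (("catFR1", "R1489E"), [3, 55]), (("catFR1", "R1400N"), [39]),
     (("catFR1", "R1190P"), [96]), (("catFR1", "R1092J"), [39]),
     (("catFR1", "R1028M"), [8]), (("catFR1", "R1107J"), [3]),
     (("catFR1", "R1364C"), [60]), (("catFR1", "R1527J"), [156]),
     (("RepFR1", "R1528E"), [154, 15])] := by decide

lemma getD_FR1_other (sub : String) (hA : sub ≠ "R1397D") (hB : sub ≠ "R1299T") :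
    PySem.Dict.getD pvExclusions ("FR1", sub) PySem.Set.empty = PySem.Set.empty := by
  simp [pvExclusions_mk, PySem.Dict.getD, PySem.Dict.get?, Ne.symm hA, Ne.symm hB]

lemma getD_catFR1_other (sub : String) (hA : sub ≠ "R1269E") (hB : sub ≠ "R1328E")
    (hC : sub ≠ "R1367D") (hD : sub ≠ "R1397D") (hE : sub ≠ "R1447M") (hF : sub ≠ "R1469D")
    (hG : sub ≠ "R1489E") (hH : sub ≠ "R1400N") (hI : sub ≠ "R1190P") (hJ : sub ≠ "R1092J")
    (hK : sub ≠ "R1028M") (hL : sub ≠ "R1107J") (hM : sub ≠ "R1364C") (hN : sub ≠ "R1527J") :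
    PySem.Dict.getD pvExclusions ("catFR1", sub) PySem.Set.empty = PySem.Set.empty := by
  simp [pvExclusions_mk, PySem.Dict.getD, PySem.Dict.get?, Ne.symm hA, Ne.symm hB, Ne.symm hC,
    Ne.symm hD, Ne.symm hE, Ne.symm hF, Ne.symm hG, Ne.symm hH, Ne.symm hI, Ne.symm hJ,
    Ne.symm hK, Ne.symm hL, Ne.symm hM, Ne.symm hN]

lemma getD_RepFR1_other (sub : String) (hA : sub ≠ "R1528E") :
    PySem.Dict.getD pvExclusions ("RepFR1", sub) PySem.Set.empty = PySem.Set.empty := by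
  simp [pvExclusions_mk, PySem.Dict.getD, PySem.Dict.get?, Ne.symm hA]

lemma getD_exp_other (exp sub : String) (hA : exp ≠ "FR1") (hB : exp ≠ "catFR1") (hC : exp ≠ "RepFR1") :
    PySem.Dict.getD pvExclusions (exp, sub) PySem.Set.empty = PySem.Set.empty := by
  simp [pvExclusions_mk, PySem.Dict.getD, PySem.Dict.get?, Ne.symm hA, Ne.symm hB, Ne.symm hC]

-- ===== VERDICT (by name: the statement is the Claim_ definition above) =====
theorem getElectrodeRanges_spec : Claim_equal_getElectrodeRanges := by
  intro er exp sub session mont _ hpre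
  obtain ⟨h1, h2, h3, h4, h5, h6, h7, h8, h9⟩ := hpre
  unfold Spec_getElectrodeRanges getElectrodeRanges getElectrodeRanges_alt
  by_cases hf : exp = "FR1"
  · subst hf
    by_cases c1 : sub = "R1120E"
    · subst c1; rfl
    by_cases c2 : sub = "R1349T"
    · subst c2; rfl
    by_cases c3 : sub = "R1397D"
    · subst c3
      have hb : (110 : Int) < (er.length : Int) := by
        have hnb : ¬ (er.length < 111) := fun hlt => h1 ⟨rfl, rfl, hlt⟩
        omega
      show pyRemoveBang ((PySem.List.pyRange 0 (er.length : Int) 1).filter (fun i => i != 60)) 110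
        = (PySem.List.pyRange 0 (er.length : Int) 1).filter (fun i => !(PySem.Set.contains (PySem.Set.ofList [60, 110]) i))
      exact removeOne _ 60 110 (by decide) (by decide) hb
    by_cases c4 : sub = "R1332M"
    · subst c4
      by_cases d1 : session = 1
      · subst d1
        have hb : (49 : Int) < (er.length : Int) := by
          have hnb : ¬ (er.length < 50) := fun hlt => h2 ⟨rfl, rfl, rfl, hlt⟩
          omega
        show pyRemoveBang ((PySem.List.pyRange 0 (er.length : Int) 1).filter (fun i => i != 48)) 49
          = (PySem.List.pyRange 0 (er.length : Int) 1).filter (fun i => !(PySem.Set.contains (PySem.Set.ofList [48, 49]) i))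
        exact removeOne _ 48 49 (by decide) (by decide) hb
      · simp [d1]
    by_cases c5 : sub = "R1299T"
    · subst c5
      have hb : (43 : Int) < (er.length : Int) := by
        have hnb : ¬ (er.length < 44) := fun hlt => h3 ⟨rfl, rfl, hlt⟩
        omega
      show pyRemoveBang ((PySem.List.pyRange 0 (er.length : Int) 1).filter (fun i => i != 34)) 43
        = (PySem.List.pyRange 0 (er.length : Int) 1).filter (fun i => !(PySem.Set.contains (PySem.Set.ofList [34, 43]) i))
      exact removeOne _ 34 43 (by decide) (by decide) hb
    · simp [c1, c2, c3, c4, c5, PySem.Set.empty]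
      exact fun hne => absurd (getD_FR1_other sub c3 c5) hne
  by_cases hc : exp = "catFR1"
  · subst hc
    by_cases c1 : sub = "R1269E"
    · subst c1
      have hb1 : (54 : Int) < (er.length : Int) := by
        have hnb : ¬ (er.length < 56) := fun hlt => h4 ⟨rfl, rfl, hlt⟩
        omega
      have hb2 : (55 : Int) < (er.length : Int) := by
        have hnb : ¬ (er.length < 56) := fun hlt => h4 ⟨rfl, rfl, hlt⟩
        omega
      show pyRemoveBang (pyRemoveBang ((PySem.List.pyRange 0 (er.length : Int) 1).filter (fun i => i != 11)) 54) 55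
        = (PySem.List.pyRange 0 (er.length : Int) 1).filter (fun i => !(PySem.Set.contains (PySem.Set.ofList [11, 54, 55]) i))
      exact removeTwo _ 11 54 55 (by decide) (by decide) (by decide) (by decide) hb1 (by decide) hb2
    by_cases c2 : sub = "R1328E"
    · subst c2
      show (PySem.List.pyRange 0 (er.length : Int) 1).filter (fun i => i != 38)
        = (PySem.List.pyRange 0 (er.length : Int) 1).filter (fun i => !(PySem.Set.contains (PySem.Set.ofList [38]) i))
      exact filterOne _ 38
    by_cases c3 : sub = "R1367D"
    · subst c3
      have hb : (96 : Int) < (er.length : Int) := by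
        have hnb : ¬ (er.length < 97) := fun hlt => h5 ⟨rfl, rfl, hlt⟩
        omega
      show pyRemoveBang ((PySem.List.pyRange 0 (er.length : Int) 1).filter (fun i => i != 71)) 96
        = (PySem.List.pyRange 0 (er.length : Int) 1).filter (fun i => !(PySem.Set.contains (PySem.Set.ofList [71, 96]) i))
      exact removeOne _ 71 96 (by decide) (by decide) hb
    by_cases c4 : sub = "R1397D"
    · subst c4
      have hb : (60 : Int) < (er.length : Int) := by
        have hnb : ¬ (er.length < 61) := fun hlt => h6 ⟨rfl, rfl, hlt⟩
        omega
      show pyRemoveBang ((PySem.List.pyRange 0 (er.length : Int) 1).filter (fun i => i != 110)) 60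
        = (PySem.List.pyRange 0 (er.length : Int) 1).filter (fun i => !(PySem.Set.contains (PySem.Set.ofList [110, 60]) i))
      exact removeOne _ 110 60 (by decide) (by decide) hb
    by_cases c5 : sub = "R1405E"
    · subst c5
      by_cases d1 : mont = 0
      · subst d1
        show (PySem.List.pyRange 0 (er.length : Int) 1).filter (fun i => i != 44)
          = (PySem.List.pyRange 0 (er.length : Int) 1).filter (fun i => !(PySem.Set.contains (PySem.Set.ofList [44]) i))
        exact filterOne _ 44
      by_cases d2 : mont = 1
      · subst d2
        show (PySem.List.pyRange 0 (er.length : Int) 1).filter (fun i => i != 79)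
          = (PySem.List.pyRange 0 (er.length : Int) 1).filter (fun i => !(PySem.Set.contains (PySem.Set.ofList [79]) i))
        exact filterOne _ 79
      · simp [d1, d2]
    by_cases c6 : sub = "R1447M"
    · subst c6
      have hb : (17 : Int) < (er.length : Int) := by
        have hnb : ¬ (er.length < 18) := fun hlt => h7 ⟨rfl, rfl, hlt⟩
        omega
      show pyRemoveBang ((PySem.List.pyRange 0 (er.length : Int) 1).filter (fun i => i != 15)) 17
        = (PySem.List.pyRange 0 (er.length : Int) 1).filter (fun i => !(PySem.Set.contains (PySem.Set.ofList [15, 17]) i))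
      exact removeOne _ 15 17 (by decide) (by decide) hb
    by_cases c7 : sub = "R1469D"
    · subst c7
      show (PySem.List.pyRange 0 (er.length : Int) 1).filter (fun i => i != 16)
        = (PySem.List.pyRange 0 (er.length : Int) 1).filter (fun i => !(PySem.Set.contains (PySem.Set.ofList [16]) i))
      exact filterOne _ 16
    by_cases c8 : sub = "R1489E"
    · subst c8
      have hb : (55 : Int) < (er.length : Int) := by
        have hnb : ¬ (er.length < 56) := fun hlt => h8 ⟨rfl, rfl, hlt⟩
        omega
      show pyRemoveBang ((PySem.List.pyRange 0 (er.length : Int) 1).filter (fun i => i != 3)) 55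
        = (PySem.List.pyRange 0 (er.length : Int) 1).filter (fun i => !(PySem.Set.contains (PySem.Set.ofList [3, 55]) i))
      exact removeOne _ 3 55 (by decide) (by decide) hb
    by_cases c9 : sub = "R1400N"
    · subst c9
      show (PySem.List.pyRange 0 (er.length : Int) 1).filter (fun i => i != 39)
        = (PySem.List.pyRange 0 (er.length : Int) 1).filter (fun i => !(PySem.Set.contains (PySem.Set.ofList [39]) i))
      exact filterOne _ 39
    by_cases c10 : sub = "R1190P"
    · subst c10
      show (PySem.List.pyRange 0 (er.length : Int) 1).filter (fun i => i != 96)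
        = (PySem.List.pyRange 0 (er.length : Int) 1).filter (fun i => !(PySem.Set.contains (PySem.Set.ofList [96]) i))
      exact filterOne _ 96
    by_cases c11 : sub = "R1092J"
    · subst c11
      show (PySem.List.pyRange 0 (er.length : Int) 1).filter (fun i => i != 39)
        = (PySem.List.pyRange 0 (er.length : Int) 1).filter (fun i => !(PySem.Set.contains (PySem.Set.ofList [39]) i))
      exact filterOne _ 39
    by_cases c12 : sub = "R1028M"
    · subst c12
      show (PySem.List.pyRange 0 (er.length : Int) 1).filter (fun i => i != 8)
        = (PySem.List.pyRange 0 (er.length : Int) 1).filter (fun i => !(PySem.Set.contains (PySem.Set.ofList [8]) i))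
      exact filterOne _ 8
    by_cases c13 : sub = "R1107J"
    · subst c13
      show (PySem.List.pyRange 0 (er.length : Int) 1).filter (fun i => i != 3)
        = (PySem.List.pyRange 0 (er.length : Int) 1).filter (fun i => !(PySem.Set.contains (PySem.Set.ofList [3]) i))
      exact filterOne _ 3
    by_cases c14 : sub = "R1364C"
    · subst c14
      show (PySem.List.pyRange 0 (er.length : Int) 1).filter (fun i => i != 60)
        = (PySem.List.pyRange 0 (er.length : Int) 1).filter (fun i => !(PySem.Set.contains (PySem.Set.ofList [60]) i))
      exact filterOne _ 60
    by_cases c15 : sub = "R1527J"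
    · subst c15
      show (PySem.List.pyRange 0 (er.length : Int) 1).filter (fun i => i != 156)
        = (PySem.List.pyRange 0 (er.length : Int) 1).filter (fun i => !(PySem.Set.contains (PySem.Set.ofList [156]) i))
      exact filterOne _ 156
    · simp [c1, c2, c3, c4, c5, c6, c7, c8, c9, c10, c11, c12, c13, c14, c15, PySem.Set.empty]
      exact fun hne => absurd (getD_catFR1_other sub c1 c2 c3 c4 c6 c7 c8 c9 c10 c11 c12 c13 c14 c15) hne
  by_cases hr : exp = "RepFR1"
  · subst hr
    by_cases c1 : sub = "R1528E"
    · subst c1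
      have hb : (15 : Int) < (er.length : Int) := by
        have hnb : ¬ (er.length < 16) := fun hlt => h9 ⟨rfl, rfl, hlt⟩
        omega
      show pyRemoveBang ((PySem.List.pyRange 0 (er.length : Int) 1).filter (fun i => i != 154)) 15
        = (PySem.List.pyRange 0 (er.length : Int) 1).filter (fun i => !(PySem.Set.contains (PySem.Set.ofList [154, 15]) i))
      exact removeOne _ 154 15 (by decide) (by decide) hb
    · simp [c1, PySem.Set.empty]
      exact fun hne => absurd (getD_RepFR1_other sub c1) hne
  · simp [hf, hc, hr, PySem.Set.empty]
    exact fun hne => absurd (getD_exp_other exp sub hf hc hr) hne
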